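-- pv_equiv track=rewrite | github.com/cuteStarrr/SJTU_Courses | Artificial_Intelligence/MSA/codes/Genetic_Algorithm/Genetic_Pairwise.py | CrossoverRange
-- ===== SOURCE A (Python) =====
-- def CrossoverRange(father_block, mother_block):
--     point = 1
--
--     count_left_father = sum(i < point for i in father_block)
--     count_left_mother = sum(i < point for i in mother_block)
--     while count_left_father != count_left_mother or count_left_father == 0:
--         point +=1
--         count_left_father = sum(i < point for i in father_block)
--         count_left_mother = sum(i < point for i in mother_block)
--
--     return point
-- ===== SOURCE B (Python) =====
-- def CrossoverRange(father_block, mother_block):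
--     # Only points where a left-count can change matter: 1 and x+1 for each
--     # element x >= 1.  Sweep those candidate points in increasing order,
--     # maintaining both left-counts with two pointers into the sorted blocks.
--     fs = sorted(father_block)
--     ms = sorted(mother_block)
--     cands = sorted(set([1] + [x + 1 for x in father_block + mother_block if x >= 1]))
--     i = j = 0
--     for p in cands:
--         while i < len(fs) and fs[i] < p:
--             i += 1
--         while j < len(ms) and ms[j] < p:
--             j += 1
--         if i == j and i > 0:
--             return p
--     return -1  # unreachable when a valid crossover point exists
-- ===== Notes on version B (the rewrite author's own statement) =====
-- stated objective: faster
-- what changed: Instead of testing every integer point 1,2,3,... until the left-counts agree, B sorts both blocks, enumerates only the sorted candidate boundary points (1 and x+1 for each element x >= 1) where a left-count can change, and maintains both left-counts with two pointers while sweeping those candidates.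
import Mathlib
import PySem

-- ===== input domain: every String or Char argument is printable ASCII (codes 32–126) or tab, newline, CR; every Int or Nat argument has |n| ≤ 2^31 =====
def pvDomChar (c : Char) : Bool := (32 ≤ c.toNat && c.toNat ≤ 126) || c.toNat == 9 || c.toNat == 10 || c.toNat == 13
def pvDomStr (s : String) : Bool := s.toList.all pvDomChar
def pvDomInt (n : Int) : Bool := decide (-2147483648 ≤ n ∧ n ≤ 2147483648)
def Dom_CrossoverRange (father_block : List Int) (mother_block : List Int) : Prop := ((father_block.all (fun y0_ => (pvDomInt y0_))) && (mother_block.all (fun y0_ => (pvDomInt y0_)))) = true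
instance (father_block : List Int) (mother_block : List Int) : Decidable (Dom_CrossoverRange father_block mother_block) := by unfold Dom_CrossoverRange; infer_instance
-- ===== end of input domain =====

-- B scans only the candidate points 1 and x+1 (x an element ≥ 1) instead of every
-- integer point from 1 upward; objective: faster (O(n^2) vs O(answer·n)).
-- A's Python loop diverges when no valid point exists; the port carries a fuel
-- bound large enough to cover every input satisfying Pre_ (a totality guard only).

-- ===== PORT A =====
-- sum(i < point for i in block)
def pvCnt (block : List Int) (point : Int) : Int :=
  block.foldl (fun a i => a + (if i < point then 1 else 0)) 0

-- the while loop of A: while cf != cm or cf == 0: point += 1  (fuel = totality guard)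
def pvLoopA (father_block : List Int) (mother_block : List Int) (point : Int) : Nat → Int
  | 0 => point
  | fuel + 1 =>
    let cf := pvCnt father_block point
    let cm := pvCnt mother_block point
    if cf ≠ cm ∨ cf = 0 then pvLoopA father_block mother_block (point + 1) fuel
    else point

def CrossoverRange (father_block : List Int) (mother_block : List Int) : Int :=
  pvLoopA father_block mother_block 1
    (((father_block ++ mother_block).foldl (fun a x => max a x) 0).toNat + 2)

-- ===== PORT B =====
-- the while loop "while i < len(xs) and xs[i] < p: i += 1"
def pvAdvance (xs : List Int) (p : Int) (i : Nat) : Nat :=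
  if h : i < xs.length then
    if xs[i] < p then pvAdvance xs p (i + 1) else i
  else i
termination_by xs.length - i

-- the for-loop of B over the candidate list, carrying the two pointers
def pvScanB (fs ms : List Int) : List Int → Nat → Nat → Int
  | [], _, _ => -1
  | p :: rest, i, j =>
    let i' := pvAdvance fs p i
    let j' := pvAdvance ms p j
    if i' = j' ∧ 0 < i' then p else pvScanB fs ms rest i' j'

def CrossoverRange_alt (father_block : List Int) (mother_block : List Int) : Int :=
  let fs := PySem.List.sorted father_block (fun x => x) false
  let ms := PySem.List.sorted mother_block (fun x => x) false
  pvScanB fs ms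
    (PySem.List.sorted
      (PySem.Set.ofList
        (1 :: (father_block ++ mother_block).filterMap
          (fun x => if 1 ≤ x then some (x + 1) else none)))
      (fun x => x) false)
    0 0

-- ===== PRECONDITION & SPEC =====
-- Pre_ excludes exactly the inputs on which A's while loop never terminates:
-- those with no point p ≥ 1 at which both blocks have equal nonzero left-counts
-- (equivalently, no such candidate point 1 or x+1, x an element).
def Pre_CrossoverRange (father_block : List Int) (mother_block : List Int) : Prop :=
  ∃ p ∈ (1 :: (father_block ++ mother_block).map (fun x => x + 1)),
    1 ≤ p ∧
    ((father_block.countP (fun x => decide (x < p)) : Int) =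
      (mother_block.countP (fun x => decide (x < p)) : Int)) ∧
    0 < (father_block.countP (fun x => decide (x < p)) : Int)

instance (father_block : List Int) (mother_block : List Int) : Decidable (Pre_CrossoverRange father_block mother_block) := by unfold Pre_CrossoverRange; infer_instance

def pvWitness_CrossoverRange : List Int × List Int := ([0], [0])

def Spec_CrossoverRange (father_block : List Int) (mother_block : List Int) (out : Int) : Prop := out = CrossoverRange_alt father_block mother_block
instance (father_block : List Int) (mother_block : List Int) (out : Int) : Decidable (Spec_CrossoverRange father_block mother_block out) := by unfold Spec_CrossoverRange; infer_instance

-- ===== CLAIM (what is proved, stated in full; the proofs are below) =====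
def Claim_equal_CrossoverRange : Prop := ∀ (father_block : List Int) (mother_block : List Int), Dom_CrossoverRange father_block mother_block → Pre_CrossoverRange father_block mother_block → Spec_CrossoverRange father_block mother_block (CrossoverRange father_block mother_block)

-- ===== LEMMAS AND PROOFS =====

-- the common "valid crossover point" predicate
def pvOk (f m : List Int) (p : Int) : Prop :=
  pvCnt f p = pvCnt m p ∧ 0 < pvCnt f p

lemma pvCnt_aux (p : Int) : ∀ (block : List Int) (a : Int),
    block.foldl (fun a i => a + (if i < p then 1 else 0)) a
      = a + (block.countP (fun x => decide (x < p)) : Int) := by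
  intro block
  induction block with
  | nil => intro a; simp
  | cons x xs ih =>
    intro a
    simp only [List.foldl_cons, List.countP_cons, ih]
    by_cases h : x < p
    · simp [h]; ring
    · simp [h]

lemma pvCnt_eq_countP (block : List Int) (p : Int) :
    pvCnt block p = (block.countP (fun x => decide (x < p)) : Int) := by
  simpa using pvCnt_aux p block 0

lemma pvCnt_nonneg (block : List Int) (p : Int) : 0 ≤ pvCnt block p := by
  rw [pvCnt_eq_countP]; positivity

lemma pvCnt_step (block : List Int) (p : Int) (h : (p - 1) ∉ block) :
    pvCnt block p = pvCnt block (p - 1) := by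
  rw [pvCnt_eq_countP, pvCnt_eq_countP]
  congr 1
  apply List.countP_congr
  intro x hx
  have : x ≠ p - 1 := fun he => h (he ▸ hx)
  constructor <;> intro <;> simp_all <;> omega

lemma init_le_foldl_max : ∀ (l : List Int) (a : Int),
    a ≤ l.foldl (fun a x => max a x) a := by
  intro l
  induction l with
  | nil => intro a; simp
  | cons y ys ih =>
    intro a
    exact le_trans (le_max_left a y) (ih (max a y))

lemma le_foldl_max (l : List Int) (a x : Int) (hx : x ∈ l) :
    x ≤ l.foldl (fun a x => max a x) a := by
  induction l generalizing a with
  | nil => cases hx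
  | cons y ys ih =>
    simp only [List.foldl_cons]
    rcases List.mem_cons.mp hx with h | h
    · subst h
      exact le_trans (le_max_right a x) (init_le_foldl_max ys (max a x))
    · exact ih (max a y) h

lemma pvNotOk_iff (f m : List Int) (p : Int) :
    (pvCnt f p ≠ pvCnt m p ∨ pvCnt f p = 0) ↔ ¬ pvOk f m p := by
  have := pvCnt_nonneg f p
  unfold pvOk
  constructor
  · rintro (h | h) ⟨h1, h2⟩ <;> omega
  · intro h
    by_cases h1 : pvCnt f p = pvCnt m p
    · right; by_contra h2; exact h ⟨h1, by omega⟩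
    · left; exact h1

-- A's loop returns the least ok point ≥ point when one lies within fuel
lemma pvLoopA_spec (f m : List Int) :
    ∀ (fuel : Nat) (point q : Int), point ≤ q → q < point + fuel → pvOk f m q →
      pvOk f m (pvLoopA f m point fuel) ∧
      point ≤ pvLoopA f m point fuel ∧
      pvLoopA f m point fuel ≤ q ∧
      (∀ s, point ≤ s → s < pvLoopA f m point fuel → ¬ pvOk f m s) := by
  intro fuel
  induction fuel with
  | zero => intro point q h1 h2 _; exfalso; simp at h2; omega
  | succ n ih =>
    intro point q h1 h2 hq
    simp only [pvLoopA]
    by_cases hc : pvCnt f point ≠ pvCnt m point ∨ pvCnt f point = 0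
    · rw [if_pos hc]
      have hnok : ¬ pvOk f m point := (pvNotOk_iff f m point).mp hc
      have hq1 : point + 1 ≤ q := by
        rcases lt_or_eq_of_le h1 with hlt | he
        · omega
        · exact absurd (he ▸ hq) hnok
      obtain ⟨a, b, c, d⟩ := ih (point + 1) q hq1 (by push_cast at h2 ⊢; omega) hq
      refine ⟨a, by omega, c, ?_⟩
      intro s hs1 hs2
      rcases eq_or_lt_of_le hs1 with he | hlt
      · exact he ▸ hnok
      · exact d s (by omega) hs2
    · rw [if_neg hc]
      have hok : pvOk f m point := not_not.mp (fun hn => hc ((pvNotOk_iff f m point).mpr hn))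
      exact ⟨hok, le_refl _, h1, fun s hs1 hs2 => absurd hs1 (by omega)⟩

-- on a sorted list, an element at an index below countP (· < p) is < p, and conversely
lemma sorted_countP_le (xs : List Int) (hs : xs.Pairwise (· ≤ ·)) (p : Int)
    (k : Nat) (hk : k < xs.length) (hge : p ≤ xs[k]) :
    xs.countP (fun x => decide (x < p)) ≤ k := by
  conv_lhs => rw [← List.take_append_drop k xs]
  rw [List.countP_append]
  have h1 : (xs.take k).countP (fun x => decide (x < p)) ≤ k :=
    le_trans List.countP_le_length (by simpa using Nat.min_le_left k xs.length)
  have h2 : (xs.drop k).countP (fun x => decide (x < p)) = 0 := by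
    rw [List.countP_eq_zero]
    intro a ha
    obtain ⟨idx, hidx, he⟩ := List.getElem_of_mem ha
    have hidx' : idx < xs.length - k := by simpa using hidx
    have hki : k + idx < xs.length := by omega
    have hx : a = xs[k + idx] := by rw [← he, List.getElem_drop]
    have hle : xs[k] ≤ xs[k + idx] := by
      rcases Nat.eq_or_lt_of_le (Nat.le_add_right k idx) with h | h
      · simp [← h]
      · exact List.pairwise_iff_getElem.mp hs k (k + idx) hk hki h
    simp only [decide_eq_true_eq]
    omega
  omega

lemma prefix_le_countP (xs : List Int) (p : Int) (i : Nat) (hi : i ≤ xs.length)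
    (hpre : ∀ k (hk : k < xs.length), k < i → xs[k] < p) :
    i ≤ xs.countP (fun x => decide (x < p)) := by
  conv_rhs => rw [← List.take_append_drop i xs]
  rw [List.countP_append]
  have hlen : (xs.take i).length = i := by rw [List.length_take]; omega
  have h1 : (xs.take i).countP (fun x => decide (x < p)) = (xs.take i).length := by
    rw [List.countP_eq_length]
    intro a ha
    obtain ⟨idx, hidx, he⟩ := List.getElem_of_mem ha
    have hidx' : idx < i := by omega
    have : a = xs[idx] := by
      rw [← he, List.getElem_take]
    simp only [decide_eq_true_eq, this]
    exact hpre idx (by omega) hidx'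
  omega

lemma sorted_prefix_lt (xs : List Int) (hs : xs.Pairwise (· ≤ ·)) (p : Int)
    (k : Nat) (hk : k < xs.length) (hlt : k < xs.countP (fun x => decide (x < p))) :
    xs[k] < p := by
  by_contra h
  have := sorted_countP_le xs hs p k hk (by omega)
  omega

-- the pointer-advance loop lands exactly on countP (· < p)
lemma pvAdvance_eq (xs : List Int) (hs : xs.Pairwise (· ≤ ·)) (p : Int) :
    ∀ (n i : Nat), xs.length - i = n → i ≤ xs.length →
      (∀ k (hk : k < xs.length), k < i → xs[k] < p) →
      pvAdvance xs p i = xs.countP (fun x => decide (x < p)) := by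
  intro n
  induction n with
  | zero =>
    intro i hn hi hpre
    have hieq : i = xs.length := by omega
    rw [pvAdvance, dif_neg (by omega)]
    rw [hieq, Eq.comm, List.countP_eq_length]
    intro a ha
    obtain ⟨k, hk, he⟩ := List.getElem_of_mem ha
    simpa [← he] using hpre k hk (by omega)
  | succ n ih =>
    intro i hn hi hpre
    have hilt : i < xs.length := by omega
    rw [pvAdvance, dif_pos hilt]
    by_cases hx : xs[i] < p
    · rw [if_pos hx]
      refine ih (i + 1) (by omega) (by omega) ?_
      intro k hk hki
      rcases Nat.lt_succ_iff_lt_or_eq.mp hki with h | h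
      · exact hpre k hk h
      · subst h; exact hx
    · rw [if_neg hx]
      have h1 : xs.countP (fun x => decide (x < p)) ≤ i :=
        sorted_countP_le xs hs p i hilt (by omega)
      have h2 : i ≤ xs.countP (fun x => decide (x < p)) :=
        prefix_le_countP xs p i (by omega) hpre
      omega

-- B's sweep over a strictly increasing candidate list returns the least ok point r
lemma pvScanB_spec (f m fs ms : List Int)
    (hfp : fs.Perm f) (hmp : ms.Perm m)
    (hfs : fs.Pairwise (· ≤ ·)) (hms : ms.Pairwise (· ≤ ·))
    (r : Int) (hr : pvOk f m r)
    (hmin : ∀ s, 1 ≤ s → s < r → ¬ pvOk f m s) :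
    ∀ (l : List Int) (i j : Nat), l.Pairwise (· < ·) → r ∈ l →
      (∀ x ∈ l, 1 ≤ x) →
      i ≤ fs.length → j ≤ ms.length →
      (∀ p ∈ l, ∀ k (hk : k < fs.length), k < i → fs[k] < p) →
      (∀ p ∈ l, ∀ k (hk : k < ms.length), k < j → ms[k] < p) →
      pvScanB fs ms l i j = r := by
  intro l
  induction l with
  | nil => intro i j _ h; cases h
  | cons p rest ihl =>
    intro i j hpw hmem hge hi hj hinvf hinvm
    have hadf : pvAdvance fs p i = fs.countP (fun x => decide (x < p)) :=
      pvAdvance_eq fs hfs p (fs.length - i) i rfl hi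
        (fun k hk hki => hinvf p List.mem_cons_self k hk hki)
    have hadm : pvAdvance ms p j = ms.countP (fun x => decide (x < p)) :=
      pvAdvance_eq ms hms p (ms.length - j) j rfl hj
        (fun k hk hkj => hinvm p List.mem_cons_self k hk hkj)
    have hcf : pvCnt f p = (fs.countP (fun x => decide (x < p)) : Int) := by
      rw [pvCnt_eq_countP, hfp.countP_eq]
    have hcm : pvCnt m p = (ms.countP (fun x => decide (x < p)) : Int) := by
      rw [pvCnt_eq_countP, hmp.countP_eq]
    rw [pvScanB]
    split_ifs with h
    · -- counts match and are nonzero: p is ok, so p must be r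
      obtain ⟨h1, h2⟩ := h
      have hokp : pvOk f m p := by
        constructor
        · rw [hcf, hcm, ← hadf, ← hadm, h1]
        · rw [hcf, ← hadf]; exact_mod_cast h2
      rcases List.mem_cons.mp hmem with he | ht
      · exact he.symm
      · exfalso
        have hlt : p < r := (List.pairwise_cons.mp hpw).1 r ht
        exact hmin p (hge p List.mem_cons_self) hlt hokp
    · -- not ok at p: r lies in the tail; advance both pointers
      have hnokp : ¬ pvOk f m p := by
        rintro ⟨h1, h2⟩
        apply h
        rw [hcf, hcm, hadf, hadm] at *
        constructor
        · exact_mod_cast h1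
        · exact_mod_cast h2
      have hne : r ≠ p := fun he => hnokp (he ▸ hr)
      have ht : r ∈ rest := by
        rcases List.mem_cons.mp hmem with he | ht
        · exact absurd he hne
        · exact ht
      refine ihl (pvAdvance fs p i) (pvAdvance ms p j)
        (List.pairwise_cons.mp hpw).2 ht
        (fun x hx => hge x (List.mem_cons_of_mem _ hx))
        (by rw [hadf]; exact List.countP_le_length)
        (by rw [hadm]; exact List.countP_le_length) ?_ ?_
      · intro q hq k hk hki
        have h1 : fs[k] < p := by
          rw [hadf] at hki
          exact sorted_prefix_lt fs hfs p k hk hki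
        have h2 : p < q := (List.pairwise_cons.mp hpw).1 q hq
        omega
      · intro q hq k hk hkj
        have h1 : ms[k] < p := by
          rw [hadm] at hkj
          exact sorted_prefix_lt ms hms p k hk hkj
        have h2 : p < q := (List.pairwise_cons.mp hpw).1 q hq
        omega

theorem pv_main (f m : List Int) (h : Pre_CrossoverRange f m) :
    CrossoverRange f m = CrossoverRange_alt f m := by
  obtain ⟨p, hpmem, hp1, heq, hpos⟩ := h
  have hokp : pvOk f m p := by
    unfold pvOk
    rw [pvCnt_eq_countP, pvCnt_eq_countP]
    exact ⟨heq, hpos⟩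
  set M := (f ++ m).foldl (fun a x => max a x) 0 with hM
  have hM0 : (0 : Int) ≤ M := init_le_foldl_max _ 0
  have hMt : M ≤ (M.toNat : Int) := Int.self_le_toNat M
  have hpbound : p < 1 + ((M.toNat + 2 : Nat) : Int) := by
    rcases List.mem_cons.mp hpmem with he | ht
    · push_cast; omega
    · obtain ⟨x, hx, rfl⟩ := List.mem_map.mp ht
      have hxM : x ≤ M := le_foldl_max (f ++ m) 0 x hx
      push_cast; omega
  obtain ⟨ha, hb, hc, hd⟩ := pvLoopA_spec f m (M.toNat + 2) 1 p hp1 hpbound hokp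
  set r := pvLoopA f m 1 (M.toNat + 2) with hr
  have hrL : r ∈ (1 :: (f ++ m).filterMap
      (fun x => if 1 ≤ x then some (x + 1) else none)) := by
    by_cases h1 : r = 1
    · rw [h1]; exact List.mem_cons_self
    · have h2 : 2 ≤ r := by omega
      have hnok : ¬ pvOk f m (r - 1) := hd (r - 1) (by omega) (by omega)
      have hmem' : r - 1 ∈ f ++ m := by
        by_contra hno
        have hf : pvCnt f r = pvCnt f (r - 1) :=
          pvCnt_step f r (fun hin => hno (List.mem_append_left m hin))
        have hm2 : pvCnt m r = pvCnt m (r - 1) :=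
          pvCnt_step m r (fun hin => hno (List.mem_append_right f hin))
        exact hnok ⟨by rw [← hf, ← hm2]; exact ha.1, by rw [← hf]; exact ha.2⟩
      refine List.mem_cons_of_mem _ (List.mem_filterMap.mpr ⟨r - 1, hmem', ?_⟩)
      rw [if_pos (by omega)]
      congr 1
      omega
  have hcands := PySem.List.sorted_ofList_pairwise_lt
    (1 :: (f ++ m).filterMap (fun x => if 1 ≤ x then some (x + 1) else none))
  have hfinal := pvScanB_spec f m
    (PySem.List.sorted f (fun x => x) false) (PySem.List.sorted m (fun x => x) false)
    (PySem.List.sorted_perm f (fun x => x) false) (PySem.List.sorted_perm m (fun x => x) false)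
    (PySem.List.sorted_pairwise f (fun x => x)) (PySem.List.sorted_pairwise m (fun x => x))
    r ha hd
    (PySem.List.sorted (PySem.Set.ofList (1 :: (f ++ m).filterMap
      (fun x => if 1 ≤ x then some (x + 1) else none))) (fun x => x) false)
    0 0 hcands
    ((PySem.List.mem_sorted _ _ _ r).mpr ((PySem.Set.mem_ofList _ r).mpr hrL))
    (by
      intro x hx
      have hxL := (PySem.Set.mem_ofList _ x).mp ((PySem.List.mem_sorted _ _ _ x).mp hx)
      rcases List.mem_cons.mp hxL with he | ht
      · omega
      · obtain ⟨y, _, hy⟩ := List.mem_filterMap.mp ht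
        by_cases hy1 : 1 ≤ y
        · rw [if_pos hy1] at hy
          have : y + 1 = x := Option.some.inj hy
          omega
        · rw [if_neg hy1] at hy; cases hy)
    (Nat.zero_le _) (Nat.zero_le _)
    (fun _ _ k _ hk => absurd hk (Nat.not_lt_zero k))
    (fun _ _ k _ hk => absurd hk (Nat.not_lt_zero k))
  show pvLoopA f m 1 (M.toNat + 2) = _
  rw [← hr]
  exact hfinal.symm ▸ rfl

-- ===== VERDICT (by name: the statement is the Claim_ definition above) =====
theorem CrossoverRange_spec : Claim_equal_CrossoverRange := by
  intro f m _ hpre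
  exact pv_main f m hpre
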